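-- pv_equiv track=rewrite | github.com/vibrooooo/testdownlaod- | app.py | calculate_expression_number
-- ===== SOURCE A (Python) =====
-- def calculate_expression_number(full_name):
--     letter_values = {
--         'A': 1, 'B': 2, 'C': 3, 'D': 4, 'E': 5, 'F': 6, 'G': 7, 'H': 8, 'I': 9,
--         'J': 1, 'K': 2, 'L': 3, 'M': 4, 'N': 5, 'O': 6, 'P': 7, 'Q': 8, 'R': 9,
--         'S': 1, 'T': 2, 'U': 3, 'V': 4, 'W': 5, 'X': 6, 'Y': 7, 'Z': 8
--     }
--     total = sum(letter_values.get(char, 0) for char in full_name.upper() if char.isalpha())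
--     while total > 9:
--         total = sum(map(int, str(total)))
--     return total
-- ===== SOURCE B (Python) =====
-- def calculate_expression_number(full_name):
--     total = sum((ord(c) - ord('A')) % 9 + 1 for c in full_name.upper() if c.isalpha())
--     return 0 if total == 0 else (total - 1) % 9 + 1
-- ===== Notes on version B (the rewrite author's own statement) =====
-- stated objective: simpler
-- what changed: Replaced the lookup table by the arithmetic letter value (letter index mod 9 plus 1) and the repeated digit-summing while-loop by the closed-form digital root (total-1) mod 9 + 1, with 0 for an empty total.
import Mathlib
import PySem

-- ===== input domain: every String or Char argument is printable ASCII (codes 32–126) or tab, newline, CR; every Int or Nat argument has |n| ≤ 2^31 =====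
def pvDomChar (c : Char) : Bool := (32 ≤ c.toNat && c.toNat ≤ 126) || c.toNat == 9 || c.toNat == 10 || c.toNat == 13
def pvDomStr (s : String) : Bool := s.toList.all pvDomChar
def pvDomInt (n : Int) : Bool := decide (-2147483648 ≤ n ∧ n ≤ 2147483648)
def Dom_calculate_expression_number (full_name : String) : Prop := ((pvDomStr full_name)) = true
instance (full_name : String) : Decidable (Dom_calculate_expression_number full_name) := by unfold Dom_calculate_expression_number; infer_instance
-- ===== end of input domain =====

-- B replaces A's letter-value table by the arithmetic value (ord(c)-65)%9+1 and A's
-- repeated digit-summing while-loop by the closed-form digital root (objective: simpler).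

-- ===== PORT A =====
-- the letter_values dict literal
def pvLetterValues : PySem.Dict Char Int :=
  PySem.Dict.ofList
    [('A',1),('B',2),('C',3),('D',4),('E',5),('F',6),('G',7),('H',8),('I',9),
     ('J',1),('K',2),('L',3),('M',4),('N',5),('O',6),('P',7),('Q',8),('R',9),
     ('S',1),('T',2),('U',3),('V',4),('W',5),('X',6),('Y',7),('Z',8)]

-- sum(map(int, str(total))).  int(c) is ported as (ofChars? [c]).getD 0; the default is
-- never hit here: str(total) for the loop's nonnegative total consists of digit chars only.
def pvDigitSum (t : Int) : Int :=
  ((PySem.Int.toChars t).map (fun c => (PySem.Int.ofChars? [c]).getD 0)).sum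

-- termination facts for the while-loop (cited by pvReduce's decreasing_by)
lemma pvChv_digitChar (d : Nat) (h : d < 10) :
    (PySem.Int.ofChars? [Nat.digitChar d]).getD 0 = (d : Int) := by
  interval_cases d <;> decide

lemma pvToDigitsCore_sum (f : Nat) :
    ∀ (n : Nat) (ds : List Char), n < f →
    ((Nat.toDigitsCore 10 f n ds).map (fun c => (PySem.Int.ofChars? [c]).getD 0)).sum
      = ((Nat.digits 10 n).sum : Int)
        + ((ds.map (fun c => (PySem.Int.ofChars? [c]).getD 0)).sum) := by
  induction f with
  | zero => intro n ds h; omega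
  | succ f ih =>
    intro n ds h
    rw [Nat.toDigitsCore]
    by_cases h0 : n / 10 = 0
    · simp only [h0, if_pos]
      rcases Nat.eq_zero_or_pos n with hn | hn
      · subst hn; simp [pvChv_digitChar 0 (by norm_num)]
      · have hlt : n < 10 := by omega
        rw [Nat.digits_def' (by norm_num : 1 < 10) hn]
        simp [Nat.div_eq_of_lt hlt, Nat.mod_eq_of_lt hlt,
          pvChv_digitChar n hlt, List.map_cons, List.sum_cons]
    · simp only [h0, if_false]
      have hn10 : 10 ≤ n := by
        by_contra hc; exact h0 (Nat.div_eq_of_lt (by omega))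
      have hlt : n / 10 < f := by
        have := Nat.div_lt_self (by omega : 0 < n) (by norm_num : 1 < 10)
        omega
      rw [ih (n / 10) _ hlt]
      rw [Nat.digits_def' (by norm_num : 1 < 10) (by omega : 0 < n)]
      simp [List.map_cons, List.sum_cons, pvChv_digitChar (n % 10) (Nat.mod_lt n (by norm_num))]
      ring

lemma pvDigitSum_eq (t : Int) (h : 0 ≤ t) :
    pvDigitSum t = ((Nat.digits 10 t.toNat).sum : Int) := by
  unfold pvDigitSum PySem.Int.toChars
  rw [if_neg (by omega), Nat.toDigits]
  rw [pvToDigitsCore_sum (t.toNat + 1) t.toNat [] (by omega)]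
  simp

lemma pvDigitSum_toNat_lt (t : Int) (h : 9 < t) :
    (pvDigitSum t).toNat < t.toNat := by
  rw [pvDigitSum_eq t (by omega)]
  set n := t.toNat with hn
  have hn10 : 10 ≤ n := by omega
  have hd : Nat.digits 10 n = n % 10 :: Nat.digits 10 (n / 10) :=
    Nat.digits_def' (by norm_num) (by omega)
  have hle : (Nat.digits 10 (n / 10)).sum ≤ n / 10 := Nat.digit_sum_le 10 (n / 10)
  have : (Nat.digits 10 n).sum ≤ n % 10 + n / 10 := by
    rw [hd]; simp; omega
  have hlt : (Nat.digits 10 n).sum < n := by omega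
  omega

-- while total > 9: total = sum(map(int, str(total)))
def pvReduce (t : Int) : Int :=
  if h : 9 < t then pvReduce (pvDigitSum t) else t
termination_by t.toNat
decreasing_by exact pvDigitSum_toNat_lt t h

def calculate_expression_number (full_name : String) : Int :=
  let total : Int :=
    ((PySem.Str.upper full_name).toList.filter PySem.Str.isalpha).foldl
      (fun acc c => acc + pvLetterValues.getD c 0) 0
  pvReduce total

-- ===== PORT B =====
def calculate_expression_number_alt (full_name : String) : Int :=
  let total : Int :=
    (((PySem.Str.upper full_name).toList.filter PySem.Str.isalpha).map
      (fun c => PySem.Int.mod ((c.toNat : Int) - 65) 9 + 1)).sum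
  if total = 0 then 0 else PySem.Int.mod (total - 1) 9 + 1

-- ===== PRECONDITION & SPEC =====
def Spec_calculate_expression_number (full_name : String) (out : Int) : Prop := out = calculate_expression_number_alt full_name
instance (full_name : String) (out : Int) : Decidable (Spec_calculate_expression_number full_name out) := by unfold Spec_calculate_expression_number; infer_instance

-- ===== CLAIM (what is proved, stated in full; the proofs are below) =====
def Claim_equal_calculate_expression_number : Prop := ∀ (full_name : String), Dom_calculate_expression_number full_name → Spec_calculate_expression_number full_name (calculate_expression_number full_name)

-- ===== LEMMAS AND PROOFS =====

-- every char surviving the filter over the uppercased string is an ASCII capital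
lemma pvFilter_isupper (c : Char) (l : List Char)
    (hmem : c ∈ (PySem.Chars.upper l).filter PySem.Str.isalpha) :
    65 ≤ c.toNat ∧ c.toNat ≤ 90 := by
  rw [List.mem_filter] at hmem
  obtain ⟨hcm, halpha⟩ := hmem
  rw [PySem.Chars.upper, List.mem_map] at hcm
  obtain ⟨c', _, hc'⟩ := hcm
  subst hc'
  unfold PySem.Chars.upperChar
  by_cases hl : PySem.Chars.islower c' = true
  · rw [if_pos hl]
    have hb : 97 ≤ c'.toNat ∧ c'.toNat ≤ 122 := by
      simp [PySem.Chars.islower, Char.le_def] at hl; exact ⟨hl.1, hl.2⟩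
    rw [Char.toNat_ofNat, if_pos (Or.inl (by omega))]
    omega
  · rw [if_neg hl]
    unfold PySem.Str.isalpha PySem.Chars.isalpha PySem.Chars.upperChar at halpha
    rw [if_neg hl] at halpha
    rw [Bool.or_eq_true] at halpha
    rcases halpha with hu | hlo
    · simp [PySem.Chars.isupper, Char.le_def] at hu; exact ⟨hu.1, hu.2⟩
    · exact absurd hlo hl

-- on ASCII capitals the dict value is the arithmetic value
lemma pvValue_eq (c : Char) (h65 : 65 ≤ c.toNat) (h90 : c.toNat ≤ 90) :
    pvLetterValues.getD c 0 = PySem.Int.mod ((c.toNat : Int) - 65) 9 + 1 := by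
  have H : ∀ n, n < 91 → 65 ≤ n →
      pvLetterValues.getD (Char.ofNat n) 0 = PySem.Int.mod ((n : Int) - 65) 9 + 1 := by decide
  have := H c.toNat (by omega) h65
  rwa [Char.ofNat_toNat] at this

lemma pvTotal_nonneg (l : List Char) :
    0 ≤ (l.map (fun c => PySem.Int.mod ((c.toNat : Int) - 65) 9 + 1)).sum := by
  apply List.sum_nonneg
  intro x hx
  rw [List.mem_map] at hx
  obtain ⟨c, _, hc⟩ := hx
  subst hc
  simp only [PySem.Int.mod, Int.fmod_eq_emod]
  omega

lemma pvReduce_closed (t : Int) (h : 0 ≤ t) :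
    pvReduce t = if t = 0 then 0 else PySem.Int.mod (t - 1) 9 + 1 := by
  have H : ∀ n : Nat, ∀ t : Int, 0 ≤ t → t.toNat = n →
      pvReduce t = if t = 0 then 0 else PySem.Int.mod (t - 1) 9 + 1 := by
    intro n
    induction n using Nat.strong_induction_on with
    | _ n IH =>
      intro t ht hn
      rw [pvReduce]
      by_cases h9 : 9 < t
      · rw [dif_pos h9]
        have hds_eq : pvDigitSum t = ((Nat.digits 10 t.toNat).sum : Int) := pvDigitSum_eq t ht
        have hds0 : 0 ≤ pvDigitSum t := by rw [hds_eq]; positivity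
        have hrec := IH (pvDigitSum t).toNat (by rw [← hn]; exact pvDigitSum_toNat_lt t h9)
          (pvDigitSum t) hds0 rfl
        rw [hrec]
        have hsne : (Nat.digits 10 t.toNat).sum ≠ 0 := by
          intro h0
          have hnil : Nat.digits 10 t.toNat ≠ [] :=
            Nat.digits_ne_nil_iff_ne_zero.mpr (by omega)
          exact Nat.getLast_digit_ne_zero 10 (m := t.toNat) (by omega)
            (List.sum_eq_zero_iff.mp h0 _ (List.getLast_mem hnil))
        have hne : pvDigitSum t ≠ 0 := by rw [hds_eq]; exact_mod_cast hsne
        have hmod : pvDigitSum t % 9 = t % 9 := by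
          have h2 : t.toNat % 9 = (Nat.digits 10 t.toNat).sum % 9 :=
            Nat.modEq_nine_digits_sum t.toNat
          have h3 := Int.toNat_of_nonneg ht
          rw [hds_eq]
          omega
        rw [if_neg hne, if_neg (by omega : ¬ t = 0)]
        simp only [PySem.Int.mod, Int.fmod_eq_emod]
        omega
      · rw [dif_neg h9]
        by_cases ht0 : t = 0
        · simp [ht0]
        · rw [if_neg ht0]
          simp only [PySem.Int.mod, Int.fmod_eq_emod]
          omega
  exact H t.toNat t h rfl

-- ===== VERDICT (by name: the statement is the Claim_ definition above) =====
theorem calculate_expression_number_spec : Claim_equal_calculate_expression_number := by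
  intro s _
  unfold Spec_calculate_expression_number
  unfold calculate_expression_number calculate_expression_number_alt
  simp only [PySem.Str.toList_upper]
  rw [PySem.List.foldl_add, zero_add]
  have hmap : ((PySem.Chars.upper s.toList).filter PySem.Str.isalpha).map
        (fun c => pvLetterValues.getD c 0)
      = ((PySem.Chars.upper s.toList).filter PySem.Str.isalpha).map
        (fun c => PySem.Int.mod ((c.toNat : Int) - 65) 9 + 1) := by
    apply List.map_congr_left
    intro c hc
    obtain ⟨h65, h90⟩ := pvFilter_isupper c s.toList hc
    exact pvValue_eq c h65 h90
  rw [hmap]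
  exact pvReduce_closed _ (pvTotal_nonneg _)
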